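-- pv_equiv track=rewrite | github.com/JPVillamor/Wordscapes-solver | WordScapesSolver/solver.py | makeCountList
-- ===== SOURCE A (Python) =====
-- def makeCountList(singles, letters):
-- 	countList = []
-- 	for element in singles:
-- 		count = 0
-- 		while element in letters:
-- 			count = count + 1;
-- 			letters.remove(element)
-- 		countList.append(count)
--
-- 	return countList
-- ===== SOURCE B (Python) =====
-- def makeCountList(singles, letters):
--     # Build a count table in one pass, then answer each query by lookup;
--     # a 'seen' set reproduces the depletion (duplicate element in singles -> 0).
--     cnt = {}
--     for x in letters:
--         cnt[x] = cnt.get(x, 0) + 1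
--     seen = set()
--     countList = []
--     for element in singles:
--         if element in seen:
--             countList.append(0)
--         else:
--             countList.append(cnt.get(element, 0))
--             seen.add(element)
--     letters[:] = [x for x in letters if x not in seen]
--     return countList
-- ===== Notes on version B (the rewrite author's own statement) =====
-- stated objective: faster
-- what changed: Replaces the per-element scan-and-remove while loop (repeated 'in'/.remove passes over letters) by a single counting pass building a dict, a seen-set lookup per query, and one final filter pass for the in-place depletion of letters.
import Mathlib
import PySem

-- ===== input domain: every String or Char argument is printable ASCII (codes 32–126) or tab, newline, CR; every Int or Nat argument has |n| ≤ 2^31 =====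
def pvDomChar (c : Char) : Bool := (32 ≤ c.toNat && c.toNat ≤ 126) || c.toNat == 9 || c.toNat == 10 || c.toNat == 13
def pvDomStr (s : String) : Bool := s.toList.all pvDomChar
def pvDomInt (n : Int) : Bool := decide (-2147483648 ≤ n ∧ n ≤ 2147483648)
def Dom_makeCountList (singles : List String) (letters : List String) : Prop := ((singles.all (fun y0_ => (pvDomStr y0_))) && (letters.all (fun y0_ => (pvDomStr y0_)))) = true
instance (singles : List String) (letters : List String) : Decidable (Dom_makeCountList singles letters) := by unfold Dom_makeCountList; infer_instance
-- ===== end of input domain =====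

-- B replaces A's per-element scan-and-remove while loop by one counting pass plus
-- lookups (faster). Both Pythons mutate `letters` in place identically (A depletes it,
-- B filters it to the same final list); the equivalence proved here is about the
-- RETURN value only.

-- ===== PORT A =====
-- the while loop 'while element in letters: count += 1; letters.remove(element)';
-- letters.remove(element) under the checked membership is List.erase (PySem.List.remove?_eq_some_erase)
def pvWhileA (element : String) (count : Int) (letters : List String) : Int × List String :=
  if h : element ∈ letters then
    pvWhileA element (count + 1) (letters.erase element)
  else (count, letters)
termination_by letters.length
decreasing_by
  have h1 := List.length_erase_of_mem h
  have h2 := List.length_pos_of_mem h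
  omega

def makeCountList (singles : List String) (letters : List String) : List Int :=
  (singles.foldl (fun (st : List String × List Int) element =>
      let r := pvWhileA element 0 st.1
      (r.2, st.2 ++ [r.1])) (letters, [])).2

-- ===== PORT B =====
def makeCountList_alt (singles : List String) (letters : List String) : List Int :=
  let cnt : PySem.Dict String Int :=
    letters.foldl (fun d x => d.insert x (d.getD x 0 + 1)) PySem.Dict.empty
  (singles.foldl (fun (st : List Int × PySem.Set String) element =>
      if PySem.Set.contains st.2 element then (st.1 ++ [0], st.2)
      else (st.1 ++ [cnt.getD element 0], PySem.Set.add st.2 element))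
    ([], PySem.Set.empty)).1

-- ===== PRECONDITION & SPEC =====
def Spec_makeCountList (singles : List String) (letters : List String) (out : List Int) : Prop := out = makeCountList_alt singles letters
instance (singles : List String) (letters : List String) (out : List Int) : Decidable (Spec_makeCountList singles letters out) := by unfold Spec_makeCountList; infer_instance

-- ===== CLAIM (what is proved, stated in full; the proofs are below) =====
def Claim_equal_makeCountList : Prop := ∀ (singles : List String) (letters : List String), Dom_makeCountList singles letters → Spec_makeCountList singles letters (makeCountList singles letters)

-- ===== LEMMAS AND PROOFS =====

-- erasing one copy of e then dropping all copies = dropping all copies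
lemma filter_ne_erase (e : String) (l : List String) :
    (l.erase e).filter (fun x => x != e) = l.filter (fun x => x != e) := by
  induction l with
  | nil => simp
  | cons x l ih =>
    by_cases hx : x = e
    · subst hx; simp
    · simp [hx, ih]

-- A's while loop: total count and all-copies-removed remainder
lemma pvWhileA_eq (e : String) : ∀ l c, pvWhileA e c l = (c + (l.count e : Int), l.filter (fun x => x != e)) := by
  intro l
  induction hn : l.length using Nat.strong_induction_on generalizing l with
  | _ n ih =>
    intro c
    rw [pvWhileA]
    by_cases h : e ∈ l
    · have h1 := List.length_erase_of_mem h
      have h2 := List.length_pos_of_mem h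
      have hc : 1 ≤ l.count e := List.one_le_count_iff.mpr h
      rw [dif_pos h, ih (l.erase e).length (by omega) (l.erase e) rfl]
      rw [List.count_erase_self, filter_ne_erase]
      have hcast : ((l.count e - 1 : Nat) : Int) = (l.count e : Int) - 1 := by omega
      rw [hcast]
      simp only [Prod.mk.injEq]
      exact ⟨by ring, trivial⟩
    · rw [dif_neg h]
      have hc : l.count e = 0 := List.count_eq_zero.mpr h
      have hf : l.filter (fun x => x != e) = l :=
        List.filter_eq_self.mpr (fun a ha => by simp; rintro rfl; exact h ha)
      simp [hc, hf]

lemma contains_mem (s : PySem.Set String) (x : String) :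
    PySem.Set.contains s x = decide (x ∈ s) := by
  simp [PySem.Set.contains]

lemma contains_add (s : PySem.Set String) (e x : String) :
    PySem.Set.contains (PySem.Set.add s e) x = (PySem.Set.contains s x || x == e) := by
  rw [contains_mem, contains_mem]
  by_cases h2 : x = e
  · subst h2
    simp [PySem.Set.mem_add]
  · simp [PySem.Set.mem_add, h2]

-- the main loop invariant: A run on the seen-filtered letters produces B's list
lemma loop_eq (letters0 : List String) :
    ∀ (singles : List String) (seen : PySem.Set String) (acc : List Int),
    (singles.foldl (fun (st : List String × List Int) element =>
        let r := pvWhileA element 0 st.1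
        (r.2, st.2 ++ [r.1]))
      (letters0.filter (fun x => !PySem.Set.contains seen x), acc)).2
    = (singles.foldl (fun (st : List Int × PySem.Set String) element =>
        if PySem.Set.contains st.2 element then (st.1 ++ [0], st.2)
        else (st.1 ++ [(PySem.Dict.counter letters0).getD element 0], PySem.Set.add st.2 element))
      (acc, seen)).1 := by
  intro singles
  induction singles with
  | nil => intro seen acc; rfl
  | cons e rest ih =>
    intro seen acc
    simp only [List.foldl_cons]
    rw [pvWhileA_eq]
    by_cases hs : e ∈ seen
    · have hs' : PySem.Set.contains seen e = true := by rw [contains_mem]; simpa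
      have hnm : e ∉ letters0.filter (fun x => !PySem.Set.contains seen x) := by
        simp [List.mem_filter]
        intro _; exact hs
      have hc : (letters0.filter (fun x => !PySem.Set.contains seen x)).count e = 0 :=
        List.count_eq_zero.mpr hnm
      have hf : (letters0.filter (fun x => !PySem.Set.contains seen x)).filter (fun x => x != e)
          = letters0.filter (fun x => !PySem.Set.contains seen x) :=
        List.filter_eq_self.mpr (fun a ha => by simp; rintro rfl; exact hnm ha)
      simp only [hc, hf, hs', if_pos]
      have := ih seen (acc ++ [0])
      simpa using this
    · have hb : PySem.Set.contains seen e = false := by rw [contains_mem]; simpa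
      -- count over the filtered list = count over letters0 (e passes the filter)
      have hc : (letters0.filter (fun x => !PySem.Set.contains seen x)).count e
          = letters0.count e := by
        rw [List.count_filter]; simp [hs]
      have hf : (letters0.filter (fun x => !PySem.Set.contains seen x)).filter (fun x => x != e)
          = letters0.filter (fun x => !PySem.Set.contains (PySem.Set.add seen e) x) := by
        rw [List.filter_filter]
        apply List.filter_congr
        intro x _
        rw [contains_add]
        by_cases h2 : x = e
        · subst h2; simp
        · simp [bne, Bool.and_comm]
      simp only [hc, hf, hb, if_neg, Bool.false_eq_true, not_false_iff]
      have := ih (PySem.Set.add seen e) (acc ++ [(letters0.count e : Int)])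
      simpa [PySem.Dict.getD_counter] using this

-- ===== VERDICT (by name: the statement is the Claim_ definition above) =====
theorem makeCountList_spec : Claim_equal_makeCountList := by
  intro singles letters _
  unfold Spec_makeCountList makeCountList makeCountList_alt
  rw [PySem.Dict.foldl_insert_getD_add_one_eq_counter]
  have h0 : letters.filter (fun x => !PySem.Set.contains PySem.Set.empty x) = letters := by
    simp [PySem.Set.empty, PySem.Set.contains]
  have := loop_eq letters singles PySem.Set.empty []
  rw [h0] at this
  exact this
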